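-- pv_equiv track=rewrite | github.com/veeral-patel/leetcode-samples | uniqueString.py | uniqueString
-- ===== SOURCE A (Python) =====
-- import itertools
--
-- def uniqueString(lst):
--     hmap = {}
--     for i, s in enumerate(lst):
--         substrings = generateSubstrings(s)
--         for substring in substrings:
--             for j, s2 in enumerate(lst):
--                 if i != j:
--                     substrings2 = generateSubstrings(s2)
--                     if substring not in substrings2 and s not in hmap:
--                         hmap[s] = substring
--         if s not in hmap:
--             hmap[s] = s
--
--     return hmap
--
-- def generateSubstrings(s):
--     for i, j in itertools.combinations(range(len(s)+1), 2):
--         yield s[i:j]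
-- ===== SOURCE B (Python) =====
-- def uniqueString(lst):
--     # Count, over all strings, how many contain each substring; a substring of s is
--     # "unique vs some other string" iff its containment count is below len(lst).
--     n = len(lst)
--
--     def allSubs(s):
--         return [s[a:b] for a in range(len(s)) for b in range(a + 1, len(s) + 1)]
--
--     sets = [set(allSubs(s)) for s in lst]
--     cnt = {}
--     for st in sets:
--         for sub in st:
--             cnt[sub] = cnt.get(sub, 0) + 1
--
--     res = {}
--     for s in lst:
--         if s in res:
--             continue
--         res[s] = next((sub for sub in allSubs(s) if cnt.get(sub, 0) < n), s)
--     return res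
-- ===== Notes on version B (the rewrite author's own statement) =====
-- stated objective: faster
-- what changed: Instead of re-generating every other string's substrings for each (substring, other-string) pair inside three nested loops, B builds each string's substring set once, counts for every substring how many strings contain it, and picks the first substring whose count is below len(lst).
import Mathlib
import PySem

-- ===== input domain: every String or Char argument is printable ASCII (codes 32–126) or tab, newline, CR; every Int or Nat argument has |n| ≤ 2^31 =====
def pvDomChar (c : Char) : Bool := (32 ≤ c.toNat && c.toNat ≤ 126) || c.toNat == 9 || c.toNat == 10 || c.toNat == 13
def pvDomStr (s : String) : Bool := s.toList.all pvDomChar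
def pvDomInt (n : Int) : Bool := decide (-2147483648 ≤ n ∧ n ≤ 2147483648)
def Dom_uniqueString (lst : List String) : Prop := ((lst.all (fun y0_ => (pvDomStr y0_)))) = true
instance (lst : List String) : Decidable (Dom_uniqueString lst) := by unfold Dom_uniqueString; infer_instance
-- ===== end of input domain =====

-- B replaces A's triple nested loop (which re-generates every other string's substrings per pair)
-- by one substring-count table, then picks the first substring whose count is below len(lst); objective: faster.

-- ===== PORT A =====
-- itertools.combinations(range(n), 2): pairs (i, j) with i < j, in lexicographic order
def combPairs (n : Nat) : List (Nat × Nat) :=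
  (List.range n).flatMap (fun i => ((List.range n).filter (fun j => decide (i < j))).map (fun j => (i, j)))

-- generateSubstrings(s): s[i:j] for (i, j) in combinations(range(len(s)+1), 2)
def genSubstrings (cs : List Char) : List (List Char) :=
  (combPairs (cs.length + 1)).map (fun ij => PySem.List.slice cs (some (ij.1 : Int)) (some (ij.2 : Int)))

-- body of the innermost loop 'for j, s2 in enumerate(lst): if i != j: …'
def uStepJ (s : String) (sub : List Char) (i : Int) (d : PySem.Dict String String)
    (q : Int × String) : PySem.Dict String String :=
  if i ≠ q.1 then
    if ¬ (genSubstrings q.2.toList).contains sub ∧ ¬ d.contains s then d.insert s (String.ofList sub) else d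
  else d

def uInnerJ (lst : List String) (s : String) (i : Int) (sub : List Char)
    (d : PySem.Dict String String) : PySem.Dict String String :=
  (PySem.List.enumerate lst).foldl (uStepJ s sub i) d

-- 'for substring in substrings: …'
def uInnerSub (lst : List String) (i : Int) (s : String)
    (d : PySem.Dict String String) : PySem.Dict String String :=
  (genSubstrings s.toList).foldl (fun d sub => uInnerJ lst s i sub d) d

-- one iteration of 'for i, s in enumerate(lst): …' including the fallback hmap[s] = s
def uStepA (lst : List String) (d : PySem.Dict String String) (p : Int × String) :
    PySem.Dict String String :=
  let d := uInnerSub lst p.1 p.2 d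
  if ¬ d.contains p.2 then d.insert p.2 p.2 else d

def uniqueString (lst : List String) : List (String × String) :=
  ((PySem.List.enumerate lst).foldl (uStepA lst) PySem.Dict.empty).items

-- ===== PORT B =====
-- allSubs(s) = [s[a:b] for a in range(len(s)) for b in range(a+1, len(s)+1)]
def allSubs (cs : List Char) : List (List Char) :=
  (List.range cs.length).flatMap (fun a =>
    (List.range' (a + 1) (cs.length - a)).map (fun (b : Nat) =>
      PySem.List.slice cs (some (a : Int)) (some (b : Int))))

-- cnt: for st in sets: for sub in st: cnt[sub] = cnt.get(sub, 0) + 1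
def subCounts (lst : List String) : PySem.Dict (List Char) Int :=
  (lst.map (fun s => PySem.Set.ofList (allSubs s.toList))).foldl
    (fun d st => st.foldl (fun d sub => d.insert sub (d.getD sub 0 + 1)) d) PySem.Dict.empty

-- res[s] = next((sub for sub in allSubs(s) if cnt.get(sub, 0) < n), s)
def uStepB (cnt : PySem.Dict (List Char) Int) (n : Int) (d : PySem.Dict String String)
    (s : String) : PySem.Dict String String :=
  if d.contains s then d
  else d.insert s (((allSubs s.toList).find? (fun sub => decide (cnt.getD sub 0 < n))).elim s String.ofList)

def uniqueString_alt (lst : List String) : List (String × String) :=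
  (lst.foldl (uStepB (subCounts lst) (lst.length : Int)) PySem.Dict.empty).items

-- ===== PRECONDITION & SPEC =====
def Spec_uniqueString (lst : List String) (out : List (String × String)) : Prop := out = uniqueString_alt lst
instance (lst : List String) (out : List (String × String)) : Decidable (Spec_uniqueString lst out) := by unfold Spec_uniqueString; infer_instance

-- ===== CLAIM (what is proved, stated in full; the proofs are below) =====
def Claim_equal_uniqueString : Prop := ∀ (lst : List String), Dom_uniqueString lst → Spec_uniqueString lst (uniqueString lst)

-- ===== LEMMAS AND PROOFS =====

-- A's substring predicate: ∃ another index whose string misses sub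
def pA (lst : List String) (i : Int) (sub : List Char) : Bool :=
  (PySem.List.enumerate lst).any (fun q => decide (i ≠ q.1) && !((genSubstrings q.2.toList).contains sub))

theorem filter_range_lt (i m : Nat) :
    (List.range m).filter (fun j => decide (i < j)) = List.range' (i + 1) (m - (i + 1)) := by
  induction m with
  | zero => simp
  | succ m ih =>
    rw [List.range_succ, List.filter_append, ih]
    by_cases h : i < m
    · have h1 : m + 1 - (i + 1) = (m - (i + 1)) + 1 := by omega
      rw [h1, List.range'_concat]
      have h2 : (i + 1) + 1 * (m - (i + 1)) = m := by omega
      rw [h2]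
      simp [h]
    · have h1 : m + 1 - (i + 1) = m - (i + 1) := by omega
      rw [h1]
      simp [h]

theorem gen_eq_allSubs (cs : List Char) : genSubstrings cs = allSubs cs := by
  unfold genSubstrings combPairs allSubs
  rw [List.map_flatMap]
  simp only [List.map_map, filter_range_lt]
  rw [List.range_succ, List.flatMap_append]
  have hnil : List.flatMap (fun i => ((List.range' (i + 1) (cs.length + 1 - (i + 1))).map
      ((fun ij => PySem.List.slice cs (some (ij.1 : Int)) (some (ij.2 : Int))) ∘ fun j => (i, j))))
      [cs.length] = [] := by
    simp
  rw [hnil, List.append_nil]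
  apply List.flatMap_congr
  intro a ha
  have hlt : a < cs.length := List.mem_range.mp ha
  have h1 : cs.length + 1 - (a + 1) = cs.length - a := by omega
  rw [h1]
  simp [Function.comp]

theorem foldl_stepJ_contains (s : String) (sub : List Char) (i : Int)
    (l : List (Int × String)) (d : PySem.Dict String String) (h : d.contains s = true) :
    l.foldl (uStepJ s sub i) d = d := by
  induction l with
  | nil => rfl
  | cons q l ih => simp [List.foldl_cons, uStepJ, h, ih]

theorem foldl_stepJ_not_contains (s : String) (sub : List Char) (i : Int)
    (l : List (Int × String)) (d : PySem.Dict String String) (h : d.contains s = false) :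
    l.foldl (uStepJ s sub i) d =
      if l.any (fun q => decide (i ≠ q.1) && !((genSubstrings q.2.toList).contains sub))
      then d.insert s (String.ofList sub) else d := by
  induction l with
  | nil => simp
  | cons q l ih =>
    rw [List.foldl_cons, List.any_cons]
    by_cases hij : i ≠ q.1
    · by_cases hc : sub ∈ genSubstrings q.2.toList
      · have hstep : uStepJ s sub i d q = d := by simp [uStepJ, hc]
        have hhead : (decide (i ≠ q.1) && !((genSubstrings q.2.toList).contains sub)) = false := by
          simp [hc]
        rw [hstep, ih, hhead, Bool.false_or]
      · have hstep : uStepJ s sub i d q = d.insert s (String.ofList sub) := by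
          simp [uStepJ, hij, hc, h]
        have hhead : (decide (i ≠ q.1) && !((genSubstrings q.2.toList).contains sub)) = true := by
          simp [hij, hc]
        rw [hstep, foldl_stepJ_contains s sub i l _ (PySem.Dict.contains_insert_self _ _ _), hhead,
          Bool.true_or, if_pos rfl]
    · have hq : i = q.1 := not_not.mp hij
      have hstep : uStepJ s sub i d q = d := by simp [uStepJ, hij]
      have hhead : (decide (i ≠ q.1) && !((genSubstrings q.2.toList).contains sub)) = false := by
        simp [hq]
      rw [hstep, ih, hhead, Bool.false_or]

theorem foldl_innerJ_contains (lst : List String) (s : String) (i : Int)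
    (subsl : List (List Char)) (d : PySem.Dict String String) (h : d.contains s = true) :
    subsl.foldl (fun d sub => uInnerJ lst s i sub d) d = d := by
  induction subsl with
  | nil => rfl
  | cons sub rest ih =>
    rw [List.foldl_cons]
    rw [show uInnerJ lst s i sub d = d from foldl_stepJ_contains s sub i _ d h]
    exact ih

theorem foldl_innerJ_not_contains (lst : List String) (s : String) (i : Int)
    (subsl : List (List Char)) (d : PySem.Dict String String) (h : d.contains s = false) :
    subsl.foldl (fun d sub => uInnerJ lst s i sub d) d =
      (subsl.find? (pA lst i)).elim d (fun sub => d.insert s (String.ofList sub)) := by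
  induction subsl with
  | nil => simp
  | cons sub rest ih =>
    rw [List.foldl_cons, List.find?_cons]
    by_cases hp : pA lst i sub
    · have : uInnerJ lst s i sub d = d.insert s (String.ofList sub) := by
        rw [uInnerJ, foldl_stepJ_not_contains s sub i _ d h]
        rw [show (PySem.List.enumerate lst).any
            (fun q => decide (i ≠ q.1) && !((genSubstrings q.2.toList).contains sub)) = true from hp]
        simp
      rw [this, foldl_innerJ_contains lst s i rest _ (PySem.Dict.contains_insert_self _ _ _), hp]
      simp
    · have hpf : pA lst i sub = false := by simpa using hp
      have : uInnerJ lst s i sub d = d := by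
        rw [uInnerJ, foldl_stepJ_not_contains s sub i _ d h]
        rw [show (PySem.List.enumerate lst).any
            (fun q => decide (i ≠ q.1) && !((genSubstrings q.2.toList).contains sub)) = false from hpf]
        simp
      rw [this, ih, hpf]

theorem stepA_char (lst : List String) (d : PySem.Dict String String) (p : Int × String) :
    uStepA lst d p =
      if d.contains p.2 then d
      else d.insert p.2 (((genSubstrings p.2.toList).find? (pA lst p.1)).elim p.2 String.ofList) := by
  unfold uStepA uInnerSub
  by_cases h : d.contains p.2
  · rw [foldl_innerJ_contains lst p.2 p.1 _ d h]
    simp [h]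
  · have h' : d.contains p.2 = false := by simpa using h
    rw [foldl_innerJ_not_contains lst p.2 p.1 _ d h']
    cases hf : (genSubstrings p.2.toList).find? (pA lst p.1) with
    | none => simp [h']
    | some sub => simp [h', PySem.Dict.contains_insert_self]

theorem find?_congr' {α : Type} (l : List α) (p q : α → Bool)
    (h : ∀ x ∈ l, p x = q x) : l.find? p = l.find? q := by
  induction l with
  | nil => rfl
  | cons x l ih =>
    rw [List.find?_cons, List.find?_cons, h x (List.mem_cons_self)]
    cases q x with
    | true => rfl
    | false => exact ih (fun y hy => h y (List.mem_cons_of_mem _ hy))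

theorem getD_subCounts (lst : List String) (sub : List Char) :
    (subCounts lst).getD sub 0 =
      (lst.countP (fun t => (allSubs t.toList).contains sub) : Int) := by
  have hcount : ((lst.map (fun s => PySem.Set.ofList (allSubs s.toList))).flatten).count sub
      = lst.countP (fun t => (allSubs t.toList).contains sub) := by
    rw [List.count_flatten, List.map_map]
    induction lst with
    | nil => simp
    | cons t l ih =>
      rw [List.map_cons, List.sum_cons, List.countP_cons, ih]
      by_cases hm : sub ∈ allSubs t.toList
      · have h1 : (PySem.Set.ofList (allSubs t.toList)).count sub = 1 := by
          apply List.count_eq_one_of_mem (PySem.Set.nodup_ofList _)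
          rw [PySem.Set.mem_ofList]
          exact hm
        simp only [Function.comp]
        rw [h1]
        simp [hm]
        omega
      · have h1 : (PySem.Set.ofList (allSubs t.toList)).count sub = 0 := by
          apply List.count_eq_zero.mpr
          rw [PySem.Set.mem_ofList]
          exact hm
        simp only [Function.comp]
        rw [h1]
        simp [hm]
  unfold subCounts
  rw [← List.foldl_flatten, PySem.Dict.getD_foldl_insert_add_one, PySem.Dict.getD_empty, hcount]
  omega

theorem countP_lt_of_not_all {α : Type} (l : List α) (p : α → Bool)
    (h : ¬ ∀ a ∈ l, p a) : l.countP p < l.length := by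
  rw [Nat.lt_iff_le_and_ne]
  refine ⟨List.countP_le_length, fun hc => h ?_⟩
  exact (List.countP_eq_length).mp hc

theorem pA_iff (lst : List String) (k : Nat) (hk : k < lst.length) (sub : List Char)
    (hsub : sub ∈ allSubs (lst[k]).toList) :
    pA lst (k : Int) sub = decide ((subCounts lst).getD sub 0 < (lst.length : Int)) := by
  rw [getD_subCounts]
  rw [Bool.eq_iff_iff]
  rw [decide_eq_true_iff]
  have hcast : ((lst.countP (fun t => (allSubs t.toList).contains sub) : Int) < (lst.length : Int))
      ↔ lst.countP (fun t => (allSubs t.toList).contains sub) < lst.length := by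
    exact_mod_cast Iff.rfl
  rw [hcast]
  unfold pA
  rw [List.any_eq_true]
  constructor
  · rintro ⟨q, hq, hcond⟩
    rw [PySem.List.mem_enumerate_iff] at hq
    obtain ⟨j, hj, rfl⟩ := hq
    simp only [Bool.and_eq_true, Bool.not_eq_true', decide_eq_true_iff] at hcond
    apply countP_lt_of_not_all
    intro hall
    have := hall (lst[j]) (List.getElem_mem hj)
    rw [gen_eq_allSubs] at hcond
    rw [hcond.2] at this
    exact absurd this (by simp)
  · intro hlt
    have : ¬ ∀ t ∈ lst, (allSubs t.toList).contains sub := by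
      intro hall
      have := (List.countP_eq_length).mpr hall
      omega
    push Not at this
    obtain ⟨t, ht, hnt⟩ := this
    obtain ⟨j, hj, rfl⟩ := List.mem_iff_getElem.mp ht
    refine ⟨((0 : Int) + (j : Int), lst[j]), ?_, ?_⟩
    · rw [PySem.List.mem_enumerate_iff]
      exact ⟨j, hj, rfl⟩
    · have hjk : j ≠ k := by
        intro h; subst h
        exact hnt (by simpa [List.contains_iff_mem] using hsub)
      simp only [Bool.and_eq_true, Bool.not_eq_true', decide_eq_true_iff]
      constructor
      · intro h; apply hjk; omega
      · rw [gen_eq_allSubs]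
        simpa using hnt

theorem main_eq (lst : List String) : uniqueString lst = uniqueString_alt lst := by
  unfold uniqueString uniqueString_alt
  congr 1
  rw [PySem.List.foldl_congr_mem (PySem.List.enumerate lst) (uStepA lst)
    (fun d q => uStepB (subCounts lst) (lst.length : Int) d q.2) PySem.Dict.empty ?_]
  · rw [show List.foldl (uStepB (subCounts lst) (lst.length : Int)) PySem.Dict.empty lst
        = List.foldl (uStepB (subCounts lst) (lst.length : Int)) PySem.Dict.empty
            ((PySem.List.enumerate lst).map (·.2)) from by rw [PySem.List.map_snd_enumerate]]
    rw [List.foldl_map]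
  · intro d q hq
    rw [stepA_char]
    unfold uStepB
    rw [PySem.List.mem_enumerate_iff] at hq
    obtain ⟨k, hk, rfl⟩ := hq
    by_cases h : d.contains lst[k]
    · simp [h]
    · simp only [h, Bool.false_eq_true, if_false]
      rw [gen_eq_allSubs, show (0 : Int) + (k : Int) = (k : Int) from by omega]
      congr 2
      apply find?_congr'
      exact fun sub hsubmem => pA_iff lst k hk sub hsubmem

-- ===== VERDICT (by name: the statement is the Claim_ definition above) =====
theorem uniqueString_spec : Claim_equal_uniqueString := by
  intro lst _
  unfold Spec_uniqueString
  exact main_eq lst
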